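-- pv_equiv track=rewrite | github.com/Paranoid49/myblog | app/services/post_service.py | extract_markdown_title
-- ===== SOURCE A (Python) =====
-- def extract_markdown_title(markdown: str) -> str:
--     for line in markdown.splitlines():
--         stripped = line.strip()
--         if stripped.startswith("# "):
--             return stripped[2:].strip() or "Untitled"
--
--     for line in markdown.splitlines():
--         stripped = line.strip()
--         if stripped:
--             return stripped[:80]
--
--     return "Untitled"
-- ===== SOURCE B (Python) =====
-- def extract_markdown_title(markdown: str) -> str:
--     first_nonempty = None
--     for line in markdown.splitlines():
--         stripped = line.strip()
--         if stripped.startswith("# "):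
--             return stripped[2:].strip() or "Untitled"
--         if stripped and first_nonempty is None:
--             first_nonempty = stripped
--     return first_nonempty[:80] if first_nonempty is not None else "Untitled"
-- ===== Notes on version B (the rewrite author's own statement) =====
-- stated objective: simpler
-- what changed: Replaces A's two separate scans of splitlines() with a single pass that returns a heading immediately and keeps the first non-empty line as an accumulator fallback.
import Mathlib
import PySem

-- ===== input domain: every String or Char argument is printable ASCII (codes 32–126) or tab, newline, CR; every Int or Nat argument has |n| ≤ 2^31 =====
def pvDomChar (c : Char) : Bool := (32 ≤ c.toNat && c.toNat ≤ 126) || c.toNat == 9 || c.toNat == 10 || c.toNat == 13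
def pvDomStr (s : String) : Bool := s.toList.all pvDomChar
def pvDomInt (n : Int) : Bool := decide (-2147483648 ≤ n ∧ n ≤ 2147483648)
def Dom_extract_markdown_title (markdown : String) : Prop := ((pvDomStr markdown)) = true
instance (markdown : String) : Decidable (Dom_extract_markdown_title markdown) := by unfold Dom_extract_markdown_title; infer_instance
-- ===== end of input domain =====

-- B merges A's two scans of splitlines() into one pass that keeps the first
-- non-empty line as a fallback accumulator (objective: simpler, one pass).

-- ===== PORT A =====
-- first loop: return heading title at the first line whose strip starts with "# "
def pvA_heading : List String → Option String
  | [] => none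
  | l :: ls =>
    let stripped := PySem.Str.strip l
    if PySem.Str.startswith stripped "# " then
      let t := PySem.Str.strip (PySem.Str.slice stripped (some 2) none)
      some (if t = "" then "Untitled" else t)
    else pvA_heading ls

-- second loop: return stripped[:80] at the first non-empty stripped line
def pvA_first_nonempty : List String → Option String
  | [] => none
  | l :: ls =>
    let stripped := PySem.Str.strip l
    if stripped ≠ "" then some (PySem.Str.slice stripped none (some 80))
    else pvA_first_nonempty ls

def extract_markdown_title (markdown : String) : String :=
  match pvA_heading (PySem.Str.splitlines markdown) with
  | some t => t
  | none =>
    match pvA_first_nonempty (PySem.Str.splitlines markdown) with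
    | some t => t
    | none => "Untitled"

-- ===== PORT B =====
-- single pass; fb is the remembered first non-empty stripped line (None → no fallback yet)
def pvB_loop : List String → Option String → String
  | [], none => "Untitled"
  | [], some fb => PySem.Str.slice fb none (some 80)
  | l :: ls, fb =>
    let stripped := PySem.Str.strip l
    if PySem.Str.startswith stripped "# " then
      let t := PySem.Str.strip (PySem.Str.slice stripped (some 2) none)
      if t = "" then "Untitled" else t
    else if stripped ≠ "" ∧ fb = none then pvB_loop ls (some stripped)
    else pvB_loop ls fb

def extract_markdown_title_alt (markdown : String) : String :=
  pvB_loop (PySem.Str.splitlines markdown) none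

-- ===== PRECONDITION & SPEC =====
def Spec_extract_markdown_title (markdown : String) (out : String) : Prop := out = extract_markdown_title_alt markdown
instance (markdown : String) (out : String) : Decidable (Spec_extract_markdown_title markdown out) := by unfold Spec_extract_markdown_title; infer_instance

-- ===== CLAIM (what is proved, stated in full; the proofs are below) =====
def Claim_equal_extract_markdown_title : Prop := ∀ (markdown : String), Dom_extract_markdown_title markdown → Spec_extract_markdown_title markdown (extract_markdown_title markdown)

-- ===== LEMMAS AND PROOFS =====

-- B's loop equals: heading if any, else the remembered fallback, else A's second scan
theorem pvB_loop_eq (ls : List String) (fb : Option String) :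
    pvB_loop ls fb =
      match pvA_heading ls with
      | some t => t
      | none =>
        match fb with
        | some f => PySem.Str.slice f none (some 80)
        | none => (pvA_first_nonempty ls).getD "Untitled" := by
  induction ls generalizing fb with
  | nil => cases fb <;> simp [pvB_loop, pvA_heading, pvA_first_nonempty]
  | cons l ls ih =>
    simp only [pvB_loop, pvA_heading, pvA_first_nonempty]
    by_cases hh : PySem.Chars.startswith (PySem.Chars.strip l.toList) ['#', ' '] = true
    · simp [hh]
    · by_cases hs : PySem.Str.strip l = ""
      · have h0 : PySem.Chars.startswith ([] : List Char) ['#', ' '] = false := by decide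
        cases fb <;> simp [hh, hs, h0, ih]
      · cases fb <;> simp [hh, hs, ih]

theorem extract_markdown_title_spec : Claim_equal_extract_markdown_title := by
  intro markdown _
  show extract_markdown_title markdown = extract_markdown_title_alt markdown
  unfold extract_markdown_title extract_markdown_title_alt
  rw [pvB_loop_eq]
  cases pvA_heading (PySem.Str.splitlines markdown) with
  | some t => rfl
  | none => cases pvA_first_nonempty (PySem.Str.splitlines markdown) <;> rfl
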